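-- pv_equiv track=rewrite | github.com/Baccussss/Generation-Texte | generation_aléatoire_mot.py | transi_markov1mot
-- ===== SOURCE A (Python) =====
-- def transi_markov1mot(listMots):
--     dico = {}
--     n = len(listMots)
--     for i in range(n-1):
--         if listMots[i] not in dico:
--             dico[listMots[i]] = {}
--             dico[listMots[i]][listMots[i+1]] = 1
--         else:
--             if listMots[i+1] not in dico[listMots[i]]:
--                 dico[listMots[i]][listMots[i+1]] = 1
--             else:
--                 dico[listMots[i]][listMots[i+1]] += 1
--     return dico
-- ===== SOURCE B (Python) =====
-- def transi_markov1mot(listMots):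
--     firsts = listMots[:-1]
--     pairs = list(zip(firsts, listMots[1:]))
--     dico = {}
--     for a in dict.fromkeys(firsts):
--         succs = [b for x, b in pairs if x == a]
--         dico[a] = {b: succs.count(b) for b in dict.fromkeys(succs)}
--     return dico
-- ===== Notes on version B (the rewrite author's own statement) =====
-- stated objective: alternative
-- what changed: B groups by source word: it deduplicates the list of first words, then for each source builds its successor-count dict in one comprehension, instead of A's single scan that increments nested counters in place.
import Mathlib
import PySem

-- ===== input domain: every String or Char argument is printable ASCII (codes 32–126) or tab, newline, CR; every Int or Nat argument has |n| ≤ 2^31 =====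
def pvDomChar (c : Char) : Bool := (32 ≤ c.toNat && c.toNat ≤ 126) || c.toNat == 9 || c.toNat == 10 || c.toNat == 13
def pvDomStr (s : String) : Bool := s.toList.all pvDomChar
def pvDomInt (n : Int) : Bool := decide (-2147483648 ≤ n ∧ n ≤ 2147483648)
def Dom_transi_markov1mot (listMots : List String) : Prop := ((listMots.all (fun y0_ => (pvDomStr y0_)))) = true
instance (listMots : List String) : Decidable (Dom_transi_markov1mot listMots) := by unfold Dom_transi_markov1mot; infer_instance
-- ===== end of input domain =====

-- B re-groups the transitions per source word (ordered dedup of the sources, then one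
-- successor-count comprehension per source) instead of A's single in-place nested-counter scan;
-- objective: alternative decomposition, same return value.

-- ===== PORT A =====
def transi_markov1mot (listMots : List String) : List (String × List (String × Int)) :=
  let n : Int := (listMots.length : Int)
  let dico : PySem.Dict String (PySem.Dict String Int) :=
    (PySem.List.pyRange 0 (n - 1)).foldl (fun dico i =>
      -- listMots[i] / listMots[i+1]: i produced by range(n-1) is always in range,
      -- so the total pyGetD with dummy default "" is exact here
      let w  := PySem.List.pyGetD listMots i ""
      let w' := PySem.List.pyGetD listMots (i + 1) ""
      if dico.contains w = false then
        dico.insert w (PySem.Dict.empty.insert w' 1)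
      else if (dico.getD w PySem.Dict.empty).contains w' = false then
        dico.insert w ((dico.getD w PySem.Dict.empty).insert w' 1)
      else
        dico.insert w ((dico.getD w PySem.Dict.empty).insert w'
          ((dico.getD w PySem.Dict.empty).getD w' 0 + 1))
      ) PySem.Dict.empty
  dico.items.map (fun p => (p.1, p.2.items))

-- ===== PORT B =====
def transi_markov1mot_alt (listMots : List String) : List (String × List (String × Int)) :=
  let firsts := PySem.List.slice listMots none (some (-1))          -- listMots[:-1]
  let pairs := firsts.zip (PySem.List.slice listMots (some 1) none) -- zip(firsts, listMots[1:])
  let dico : PySem.Dict String (List (String × Int)) :=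
    (PySem.List.dedup firsts).foldl (fun dico a =>
      let succs := (pairs.filter (fun p => p.1 == a)).map (fun p => p.2)
      -- {b: succs.count(b) for b in dict.fromkeys(succs)}: keys are distinct, its items
      -- list is exactly this map over the ordered dedup
      dico.insert a ((PySem.List.dedup succs).map (fun b => (b, (succs.count b : Int)))))
      PySem.Dict.empty
  dico.items

-- ===== PRECONDITION & SPEC =====
def Spec_transi_markov1mot (listMots : List String) (out : List (String × List (String × Int))) : Prop := out = transi_markov1mot_alt listMots
instance (listMots : List String) (out : List (String × List (String × Int))) : Decidable (Spec_transi_markov1mot listMots out) := by unfold Spec_transi_markov1mot; infer_instance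

-- ===== CLAIM (what is proved, stated in full; the proofs are below) =====
def Claim_equal_transi_markov1mot : Prop := ∀ (listMots : List String), Dom_transi_markov1mot listMots → Spec_transi_markov1mot listMots (transi_markov1mot listMots)

-- ===== LEMMAS AND PROOFS =====

-- A's loop body as a function of the pair of consecutive words
def pvStep (dico : PySem.Dict String (PySem.Dict String Int)) (p : String × String) :
    PySem.Dict String (PySem.Dict String Int) :=
  if dico.contains p.1 = false then
    dico.insert p.1 (PySem.Dict.empty.insert p.2 1)
  else if (dico.getD p.1 PySem.Dict.empty).contains p.2 = false then
    dico.insert p.1 ((dico.getD p.1 PySem.Dict.empty).insert p.2 1)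
  else
    dico.insert p.1 ((dico.getD p.1 PySem.Dict.empty).insert p.2
      ((dico.getD p.1 PySem.Dict.empty).getD p.2 0 + 1))

-- successors of a in the pair list
def pvSucc (ps : List (String × String)) (a : String) : List String :=
  (ps.filter (fun p => p.1 == a)).map (fun p => p.2)

-- canonical value of A's nested dict after folding over ps
def pvInner (ps : List (String × String)) (a : String) : PySem.Dict String Int :=
  PySem.Dict.mk ((PySem.List.dedup (pvSucc ps a)).map (fun b => (b, ((pvSucc ps a).count b : Int))))

def pvCanon (ps : List (String × String)) : PySem.Dict String (PySem.Dict String Int) :=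
  PySem.Dict.mk ((PySem.List.dedup (ps.map Prod.fst)).map (fun a => (a, pvInner ps a)))

lemma pv_dedup_snoc {α : Type} [BEq α] [LawfulBEq α] (l : List α) (x : α) :
    PySem.List.dedup (l ++ [x]) = if x ∈ l then PySem.List.dedup l else PySem.List.dedup l ++ [x] := by
  show PySem.Set.ofList (l ++ [x]) = if x ∈ l then PySem.Set.ofList l else PySem.Set.ofList l ++ [x]
  rw [PySem.Set.ofList_append_singleton, PySem.Set.add_eq_ite]
  by_cases h : x ∈ l <;> simp [PySem.Set.mem_ofList, h]

lemma pv_succ_snoc_self (ps : List (String × String)) (a b : String) :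
    pvSucc (ps ++ [(a, b)]) a = pvSucc ps a ++ [b] := by
  simp [pvSucc, List.filter_append]

lemma pv_succ_snoc_ne (ps : List (String × String)) (a b c : String) (h : c ≠ a) :
    pvSucc (ps ++ [(a, b)]) c = pvSucc ps c := by
  have h' : ¬ (a = c) := fun e => h e.symm
  simp [pvSucc, List.filter_append, h']

lemma pv_succ_nil (ps : List (String × String)) (a : String) (h : a ∉ ps.map Prod.fst) :
    pvSucc ps a = [] := by
  unfold pvSucc
  rw [List.filter_eq_nil_iff.mpr, List.map_nil]
  intro p hp
  simp only [beq_iff_eq]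
  exact fun e => h (e ▸ List.mem_map_of_mem hp)

lemma pv_keys_canon (ps : List (String × String)) :
    (pvCanon ps).keys = PySem.List.dedup (ps.map Prod.fst) := by
  simp [pvCanon, PySem.Dict.keys, List.map_map, Function.comp_def]

lemma pv_contains_canon (ps : List (String × String)) (a : String) :
    (pvCanon ps).contains a = decide (a ∈ ps.map Prod.fst) := by
  rw [PySem.Dict.contains_eq_decide_mem_keys, pv_keys_canon]
  simp only [decide_eq_decide]
  exact PySem.List.mem_dedup _ _

lemma pv_getD_canon (ps : List (String × String)) (a : String) (h : a ∈ ps.map Prod.fst) :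
    (pvCanon ps).getD a PySem.Dict.empty = pvInner ps a := by
  apply PySem.Dict.getD_of_mem_items
  · exact List.mem_map_of_mem ((PySem.List.mem_dedup _ _).mpr h)
  · rw [pv_keys_canon]; exact PySem.List.nodup_dedup _

lemma pv_keys_inner (ps : List (String × String)) (a : String) :
    (pvInner ps a).keys = PySem.List.dedup (pvSucc ps a) := by
  simp [pvInner, PySem.Dict.keys, List.map_map, Function.comp_def]

lemma pv_contains_inner (ps : List (String × String)) (a b : String) :
    (pvInner ps a).contains b = decide (b ∈ pvSucc ps a) := by
  rw [PySem.Dict.contains_eq_decide_mem_keys, pv_keys_inner]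
  simp only [decide_eq_decide]
  exact PySem.List.mem_dedup _ _

lemma pv_getD_inner (ps : List (String × String)) (a b : String) (h : b ∈ pvSucc ps a) :
    (pvInner ps a).getD b 0 = ((pvSucc ps a).count b : Int) := by
  apply PySem.Dict.getD_of_mem_items
  · exact List.mem_map_of_mem ((PySem.List.mem_dedup _ _).mpr h)
  · rw [pv_keys_inner]; exact PySem.List.nodup_dedup _

lemma pv_inner_snoc_self (ps : List (String × String)) (a b : String) :
    pvInner (ps ++ [(a, b)]) a =
      (pvInner ps a).insert b (((pvSucc ps a).count b : Int) + 1) := by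
  by_cases hb : b ∈ pvSucc ps a
  · apply PySem.Dict.ext
    rw [PySem.Dict.items_insert_of_contains _ _ (by rw [pv_contains_inner]; simpa using hb)]
    show (PySem.List.dedup (pvSucc (ps ++ [(a, b)]) a)).map _ = ((PySem.List.dedup (pvSucc ps a)).map _).map _
    rw [pv_succ_snoc_self, pv_dedup_snoc, if_pos hb, List.map_map]
    apply List.map_congr_left
    intro x hx
    by_cases hxb : x = b
    · subst hxb
      simp [List.count_append]
    · have h1 : ¬ (b = x) := fun e => hxb e.symm
      simp [List.count_append, hxb, h1]
  · apply PySem.Dict.ext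
    rw [PySem.Dict.items_insert_of_not_contains _ _ (by rw [pv_contains_inner]; simpa using hb)]
    show (PySem.List.dedup (pvSucc (ps ++ [(a, b)]) a)).map _ = _ ++ [(b, _)]
    rw [pv_succ_snoc_self, pv_dedup_snoc, if_neg hb, List.map_append]
    congr 1
    · apply List.map_congr_left
      intro x hx
      have hxs : x ∈ pvSucc ps a := (PySem.List.mem_dedup _ _).mp hx
      have h1 : ¬ (b = x) := fun e => hb (e ▸ hxs)
      simp [List.count_append, h1]
    · have h0 : (pvSucc ps a).count b = 0 := List.count_eq_zero.mpr hb
      simp [List.count_append, h0]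

lemma pv_inner_snoc_ne (ps : List (String × String)) (a b c : String) (h : c ≠ a) :
    pvInner (ps ++ [(a, b)]) c = pvInner ps c := by
  unfold pvInner
  rw [pv_succ_snoc_ne ps a b c h]

lemma pv_step_canon (ps : List (String × String)) (a b : String) :
    pvStep (pvCanon ps) (a, b) = pvCanon (ps ++ [(a, b)]) := by
  unfold pvStep
  by_cases ha : a ∈ ps.map Prod.fst
  · rw [if_neg (by rw [pv_contains_canon]; simpa using ha)]
    rw [pv_getD_canon ps a ha]
    have key : (pvCanon ps).insert a (pvInner (ps ++ [(a, b)]) a) = pvCanon (ps ++ [(a, b)]) := by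
      apply PySem.Dict.ext
      rw [PySem.Dict.items_insert_of_contains _ _ (by rw [pv_contains_canon]; simpa using ha)]
      show ((PySem.List.dedup (ps.map Prod.fst)).map _).map _ =
        (PySem.List.dedup ((ps ++ [(a, b)]).map Prod.fst)).map _
      rw [List.map_map, List.map_append]
      simp only [List.map_cons, List.map_nil]
      rw [pv_dedup_snoc, if_pos ha]
      apply List.map_congr_left
      intro x hx
      by_cases hxa : x = a
      · subst hxa; simp
      · have h1 : ¬ (x = a) := hxa
        simp only [Function.comp_def, beq_iff_eq, h1, if_false]
        rw [pv_inner_snoc_ne ps a b x hxa]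
    by_cases hb : b ∈ pvSucc ps a
    · rw [if_neg (by rw [pv_contains_inner]; simpa using hb)]
      rw [pv_getD_inner ps a b hb, ← pv_inner_snoc_self]
      exact key
    · rw [if_pos (by rw [pv_contains_inner]; simpa using hb)]
      have h0 : (pvSucc ps a).count b = 0 := List.count_eq_zero.mpr hb
      have : (1 : Int) = ((pvSucc ps a).count b : Int) + 1 := by rw [h0]; simp
      rw [this, ← pv_inner_snoc_self]
      exact key
  · rw [if_pos (by rw [pv_contains_canon]; simpa using ha)]
    apply PySem.Dict.ext
    rw [PySem.Dict.items_insert_of_not_contains _ _ (by rw [pv_contains_canon]; simpa using ha)]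
    show (PySem.List.dedup (ps.map Prod.fst)).map _ ++ [(a, _)] =
      (PySem.List.dedup ((ps ++ [(a, b)]).map Prod.fst)).map _
    rw [List.map_append]
    simp only [List.map_cons, List.map_nil]
    rw [pv_dedup_snoc, if_neg ha, List.map_append]
    congr 1
    · apply List.map_congr_left
      intro x hx
      have hxm : x ∈ ps.map Prod.fst := (PySem.List.mem_dedup _ _).mp hx
      have hxa : x ≠ a := fun e => ha (e ▸ hxm)
      rw [pv_inner_snoc_ne ps a b x hxa]
    · have hnil : pvSucc ps a = [] := pv_succ_nil ps a ha
      have hsucc : pvSucc (ps ++ [(a, b)]) a = [b] := by rw [pv_succ_snoc_self, hnil]; rfl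
      simp only [List.map_cons, List.map_nil]
      apply congrArg (fun z => [(a, z)])
      apply PySem.Dict.ext
      unfold pvInner
      rw [hsucc]
      have hd : PySem.List.dedup [b] = [b] := by
        show PySem.Set.ofList [b] = [b]
        exact PySem.Set.ofList_eq_self_of_nodup _ (List.nodup_singleton b)
      rw [hd]
      simp [List.count_cons]
      rfl

lemma pv_foldA (ps : List (String × String)) :
    ps.foldl pvStep PySem.Dict.empty = pvCanon ps := by
  induction ps using List.reverseRecOn with
  | nil => rfl
  | append_singleton ps p ih =>
      rw [List.foldl_append, ih]
      simpa using pv_step_canon ps p.1 p.2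

lemma pv_fold_range {α β : Type} (xs : List α) (d : α) (f : β → α → α → β) (init : β) :
    (PySem.List.pyRange 0 ((xs.length : Int) - 1)).foldl
        (fun acc i => f acc (PySem.List.pyGetD xs i d) (PySem.List.pyGetD xs (i + 1) d)) init
      = (xs.dropLast.zip (xs.drop 1)).foldl (fun acc p => f acc p.1 p.2) init := by
  rcases xs with _ | ⟨x, ys⟩
  · rfl
  · set xs := x :: ys with hxs
    have hlen : (xs.length : Int) - 1 = ((xs.length - 1 : Nat) : Int) := by
      simp [hxs]
    rw [hlen, PySem.List.pyRange_zero_natCast, List.foldl_map]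
    have hzip : xs.dropLast.zip (xs.drop 1) =
        (List.range (xs.length - 1)).map
          (fun (k : Nat) => (PySem.List.pyGetD xs ((k : Int)) d, PySem.List.pyGetD xs ((k : Int) + 1) d)) := by
      apply List.ext_getElem
      · simp [List.length_zip]
      · intro i h1 h2
        have hi : i < xs.length - 1 := by simpa using h2
        have hi' : i < xs.length := by omega
        have hi1 : i + 1 < xs.length := by omega
        rw [List.getElem_zip, List.getElem_map, List.getElem_range]
        have e1 : PySem.List.pyGetD xs (i : Int) d = xs[i] := by
          rw [PySem.List.pyGetD_natCast, List.getD_eq_getElem _ _ hi']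
        have e2 : PySem.List.pyGetD xs ((i : Int) + 1) d = xs[i + 1] := by
          rw [show ((i : Int) + 1) = ((i + 1 : Nat) : Int) by push_cast; ring,
            PySem.List.pyGetD_natCast, List.getD_eq_getElem _ _ hi1]
        rw [e1, e2]
        simp
    rw [hzip, List.foldl_map]

-- ===== VERDICT (by name: the statement is the Claim_ definition above) =====
lemma pv_A_closed (xs : List String) :
    transi_markov1mot xs =
      (PySem.List.dedup xs.dropLast).map
        (fun a => (a, (pvInner (xs.dropLast.zip (xs.drop 1)) a).items)) := by
  show (((PySem.List.pyRange 0 ((xs.length : Int) - 1)).foldl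
      (fun dico i => pvStep dico
        (PySem.List.pyGetD xs i "", PySem.List.pyGetD xs (i + 1) ""))
      PySem.Dict.empty).items).map (fun p => (p.1, p.2.items)) = _
  rw [pv_fold_range xs "" (fun acc w w' => pvStep acc (w, w')) PySem.Dict.empty]
  have hfold : (xs.dropLast.zip (xs.drop 1)).foldl (fun acc p => pvStep acc (p.1, p.2))
      PySem.Dict.empty = pvCanon (xs.dropLast.zip (xs.drop 1)) := pv_foldA _
  rw [hfold]
  have hfst : (xs.dropLast.zip (xs.drop 1)).map Prod.fst = xs.dropLast :=
    List.map_fst_zip (by simp)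
  show ((PySem.List.dedup ((xs.dropLast.zip (xs.drop 1)).map Prod.fst)).map
      (fun a => (a, pvInner (xs.dropLast.zip (xs.drop 1)) a))).map (fun p => (p.1, p.2.items)) = _
  rw [hfst, List.map_map]
  rfl

lemma pv_B_closed (xs : List String) :
    transi_markov1mot_alt xs =
      (PySem.List.dedup xs.dropLast).map
        (fun a => (a, (PySem.List.dedup (pvSucc (xs.dropLast.zip (xs.drop 1)) a)).map
            (fun b => (b, ((pvSucc (xs.dropLast.zip (xs.drop 1)) a).count b : Int))))) := by
  unfold transi_markov1mot_alt
  simp only [PySem.List.slice_to_neg_one, PySem.List.slice_from_one, ← List.drop_one]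
  rw [PySem.Dict.items_foldl_insert_fresh _ (fun a => a) _ _
      (fun a _ => by simp) (by simp)]
  rfl

-- ===== VERDICT (by name: the statement is the Claim_ definition above) =====
theorem transi_markov1mot_spec : Claim_equal_transi_markov1mot := by
  intro xs _
  show transi_markov1mot xs = transi_markov1mot_alt xs
  rw [pv_A_closed, pv_B_closed]
  rfl
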